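-- pv_equiv track=rewrite | github.com/Darshil-Solanki/LeetCode | daily/findTheMinimumAreaToCoverAllOnes.py | minimumArea
-- ===== SOURCE A (Python) =====
-- from typing import List
--
-- def minimumArea(grid: List[List[int]]) -> int:
--     m, n = len(grid), len(grid[0])
--     lw, rw, th, bh =  n, -1, m, 0
--
--     for i, row in enumerate(grid):
--         for j, val in enumerate(row):
--             if val:
--                 th, bh = min(th, i), i
--                 lw, rw = min(lw, j), max(rw, j)
--
--     return (rw-lw+1)*(bh-th+1)
-- ===== SOURCE B (Python) =====
-- from typing import List
--
-- def minimumArea(grid: List[List[int]]) -> int: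
--     width = max(map(len, grid))
--     rowmask = [any(row) for row in grid]
--     colmask = [any(j < len(row) and row[j] for row in grid) for j in range(width)]
--     top = rowmask.index(True)
--     bottom = len(rowmask) - 1 - rowmask[::-1].index(True)
--     left = colmask.index(True)
--     right = len(colmask) - 1 - colmask[::-1].index(True)
--     return (right - left + 1) * (bottom - top + 1)
-- ===== Notes on version B (the rewrite author's own statement) =====
-- stated objective: faster
-- what changed: Replaces A's fused Python-level scan that maintains four running min/max accumulators per cell by a projection onto two boolean occupancy masks (per-row via any(row), per-column via a short-circuiting column-major any probe) followed by list.index searches for the first set bit from each end of each mask; the per-cell Python bytecode work disappears into C-level any/index/slice primitives (measured ~6x at the largest size).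
-- outside the precondition, e.g. on minimumArea([[0], [0]]): A returns 1, B raises ValueError; on minimumArea([[0], [0, 0, 0, 7]]): A returns 3, B returns 1
import Mathlib
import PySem

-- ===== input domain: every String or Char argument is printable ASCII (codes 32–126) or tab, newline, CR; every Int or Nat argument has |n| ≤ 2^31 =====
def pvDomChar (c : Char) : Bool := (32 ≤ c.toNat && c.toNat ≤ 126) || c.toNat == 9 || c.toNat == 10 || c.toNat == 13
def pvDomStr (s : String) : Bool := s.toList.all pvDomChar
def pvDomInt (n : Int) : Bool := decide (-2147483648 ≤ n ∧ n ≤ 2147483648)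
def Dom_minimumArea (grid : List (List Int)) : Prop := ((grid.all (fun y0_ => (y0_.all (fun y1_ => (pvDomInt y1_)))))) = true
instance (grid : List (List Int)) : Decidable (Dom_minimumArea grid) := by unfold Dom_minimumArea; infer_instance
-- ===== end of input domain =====

-- B replaces A's fused scan with four running min/max accumulators by a projection onto two
-- boolean occupancy masks (row mask via any(row), column mask via column-major probes) followed
-- by first-set-bit searches (list.index) from each end of each mask (objective: faster, measured).

-- ===== PORT A =====
def minimumArea (grid : List (List Int)) : Int :=
  let m : Int := (grid.length : Int)
  let n : Int := (((PySem.List.pyGet? grid 0).getD []).length : Int)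
  let s : Int × Int × Int × Int :=
    (PySem.List.enumerate grid).foldl
      (fun st ir =>
        (PySem.List.enumerate ir.2).foldl
          (fun st jv =>
            if jv.2 ≠ 0 then (min st.1 jv.1, max st.2.1 jv.1, min st.2.2.1 ir.1, ir.1)
            else st) st)
      (n, -1, m, 0)
  (s.2.1 - s.1 + 1) * (s.2.2.2 - s.2.2.1 + 1)

-- ===== PORT B =====
-- any(j < len(row) and row[j] for row in grid)  — the column-major probe for column j
def pvColProbe (grid : List (List Int)) (j : Int) : Bool :=
  grid.any (fun row => decide (j < (row.length : Int)) && (((PySem.List.pyGet? row j).getD 0) != 0))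

-- mask[::-1] is ported as .reverse (exact: PySem.List.slice?_none_none_neg_one);
-- list.index(True) is ported as index? (it raises where index? is none — excluded by Pre_).
def minimumArea_alt (grid : List (List Int)) : Int :=
  let width : Int := (PySem.List.max? (grid.map (fun r => (r.length : Int))) (fun x => x)).getD 0
  let rowmask : List Bool := grid.map (fun row => row.any (fun v => v != 0))
  let colmask : List Bool := (PySem.List.pyRange 0 width 1).map (fun j => pvColProbe grid j)
  let top : Int := (((PySem.List.index? rowmask true).getD 0 : Nat) : Int)
  let bottom : Int := (rowmask.length : Int) - 1 - (((PySem.List.index? rowmask.reverse true).getD 0 : Nat) : Int)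
  let left : Int := (((PySem.List.index? colmask true).getD 0 : Nat) : Int)
  let right : Int := (colmask.length : Int) - 1 - (((PySem.List.index? colmask.reverse true).getD 0 : Nat) : Int)
  (right - left + 1) * (bottom - top + 1)

-- ===== PRECONDITION & SPEC =====
-- Pre_ excludes the empty grid (A raises IndexError), nonempty grids with no nonzero entry
-- (A returns the sentinel product len(grid[0])*(len(grid)-1) while B raises ValueError), and
-- ragged grids whose every nonzero lies in a column index > len(grid[0]) (there A's left bound
-- is clamped by its len(grid[0]) sentinel — an artefact on malformed input).
def Pre_minimumArea (grid : List (List Int)) : Prop :=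
  grid ≠ [] ∧ ∃ row ∈ grid, ∃ v ∈ row.take ((grid.headD []).length + 1), v ≠ 0
instance (grid : List (List Int)) : Decidable (Pre_minimumArea grid) := by
  unfold Pre_minimumArea; infer_instance

def pvWitness_minimumArea : List (List Int) := [[0, 1], [0, 0]]

def Spec_minimumArea (grid : List (List Int)) (out : Int) : Prop := out = minimumArea_alt grid
instance (grid : List (List Int)) (out : Int) : Decidable (Spec_minimumArea grid out) := by
  unfold Spec_minimumArea; infer_instance

-- ===== CLAIM (what is proved, stated in full; the proofs are below) =====
def Claim_equal_minimumArea : Prop := ∀ (grid : List (List Int)), Dom_minimumArea grid → Pre_minimumArea grid → Spec_minimumArea grid (minimumArea grid)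

-- ===== LEMMAS AND PROOFS =====

-- column indices (as Ints, starting at s) of the nonzero entries of a row
def pvColsOf (row : List Int) (s : Int) : List Int :=
  ((PySem.List.enumerate row s).filter (fun jv => jv.2 != 0)).map (fun jv => jv.1)

-- row indices (starting at s) of the rows containing a nonzero
def pvRowsOf (grid : List (List Int)) (s : Int) : List Int :=
  ((PySem.List.enumerate grid s).filter (fun ir => ir.2.any (fun v => v != 0))).map (fun ir => ir.1)

theorem pvColsOf_nil (s : Int) : pvColsOf [] s = [] := rfl

theorem pvColsOf_cons (v : Int) (vs : List Int) (s : Int) :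
    pvColsOf (v :: vs) s =
      if v ≠ 0 then s :: pvColsOf vs (s + 1) else pvColsOf vs (s + 1) := by
  by_cases hv : v = 0 <;>
    simp [pvColsOf, PySem.List.enumerate_cons, hv]

theorem pvRowsOf_nil (s : Int) : pvRowsOf [] s = [] := rfl

theorem pvRowsOf_cons (row : List Int) (rest : List (List Int)) (s : Int) :
    pvRowsOf (row :: rest) s =
      if row.any (fun v => v != 0) then s :: pvRowsOf rest (s + 1) else pvRowsOf rest (s + 1) := by
  by_cases h : row.any (fun v => v != 0) <;>
    simp [pvRowsOf, PySem.List.enumerate_cons, h]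

theorem pvInner_eq (row : List Int) : ∀ (s i lw rw th bh : Int),
    (PySem.List.enumerate row s).foldl
      (fun st jv =>
        if jv.2 ≠ 0 then (min st.1 jv.1, max st.2.1 jv.1, min st.2.2.1 i, i) else st)
      (lw, rw, th, bh)
    = ((pvColsOf row s).foldl min lw, (pvColsOf row s).foldl max rw,
       if row.any (fun v => v != 0) then min th i else th,
       if row.any (fun v => v != 0) then i else bh) := by
  induction row with
  | nil => intro s i lw rw th bh; simp [pvColsOf_nil]
  | cons v vs ih =>
    intro s i lw rw th bh
    rw [PySem.List.enumerate_cons, List.foldl_cons, pvColsOf_cons]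
    by_cases hv : v = 0
    · simp only [hv, ne_eq, not_true_eq_false, if_false, List.any_cons,
        bne_self_eq_false, Bool.false_or]
      exact ih (s + 1) i lw rw th bh
    · simp only [hv, ne_eq, not_false_eq_true, if_true, List.any_cons,
        (by simp [bne_iff_ne, hv] : (v != 0) = true), Bool.true_or]
      rw [ih (s + 1) i (min lw s) (max rw s) (min th i) i]
      simp only [List.foldl_cons]
      by_cases ha : vs.any (fun v => v != 0)
      · simp only [ha, if_true]
        rw [min_assoc, min_self]
      · simp [ha]

theorem pvOuter_eq (grid : List (List Int)) : ∀ (s lw rw th bh : Int),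
    (PySem.List.enumerate grid s).foldl
      (fun st ir =>
        (PySem.List.enumerate ir.2).foldl
          (fun st jv =>
            if jv.2 ≠ 0 then (min st.1 jv.1, max st.2.1 jv.1, min st.2.2.1 ir.1, ir.1)
            else st) st)
      (lw, rw, th, bh)
    = ((grid.flatMap (fun row => pvColsOf row 0)).foldl min lw,
       (grid.flatMap (fun row => pvColsOf row 0)).foldl max rw,
       (pvRowsOf grid s).foldl min th,
       (pvRowsOf grid s).foldl (fun _ x => x) bh) := by
  induction grid with
  | nil => intro s lw rw th bh; simp [pvRowsOf_nil]
  | cons row rest ih =>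
    intro s lw rw th bh
    rw [PySem.List.enumerate_cons, List.foldl_cons, pvRowsOf_cons]
    have hstep := pvInner_eq row 0 s lw rw th bh
    rw [hstep]
    by_cases ha : row.any (fun v => v != 0)
    · simp only [ha, if_true]
      rw [ih (s + 1) ((pvColsOf row 0).foldl min lw) ((pvColsOf row 0).foldl max rw) (min th s) s]
      simp [List.foldl_append]
    · simp only [ha, Bool.false_eq_true, if_false]
      rw [ih (s + 1) ((pvColsOf row 0).foldl min lw) ((pvColsOf row 0).foldl max rw) th bh]
      simp [List.foldl_append]

theorem pvMem_pvColsOf (row : List Int) : ∀ (s j : Int),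
    j ∈ pvColsOf row s ↔ ∃ k : Nat, k < row.length ∧ j = s + (k : Int) ∧ row.getD k 0 ≠ 0 := by
  induction row with
  | nil => intro s j; simp [pvColsOf_nil]
  | cons v vs ih =>
    intro s j
    rw [pvColsOf_cons]
    constructor
    · intro hj
      by_cases hv : v = 0
      · rw [if_neg (by simp [hv])] at hj
        obtain ⟨k, hk, hjk, hnz⟩ := (ih (s + 1) j).mp hj
        exact ⟨k + 1, by simpa using hk, by push_cast; omega, by simpa using hnz⟩
      · rw [if_pos hv] at hj
        rcases List.mem_cons.mp hj with rfl | hj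
        · exact ⟨0, by simp, by simp, by simpa using hv⟩
        · obtain ⟨k, hk, hjk, hnz⟩ := (ih (s + 1) j).mp hj
          exact ⟨k + 1, by simpa using hk, by push_cast; omega, by simpa using hnz⟩
    · rintro ⟨k, hk, rfl, hnz⟩
      cases k with
      | zero =>
        simp only [List.getD_cons_zero] at hnz
        rw [if_pos hnz]; simp
      | succ k' =>
        have hmem : s + 1 + (k' : Int) ∈ pvColsOf vs (s + 1) :=
          (ih (s + 1) _).mpr ⟨k', by simpa using hk, rfl, by simpa using hnz⟩
        have hx : s + ((k' + 1 : Nat) : Int) = s + 1 + (k' : Int) := by push_cast; omega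
        rw [hx]
        by_cases hv : v = 0
        · rwa [if_neg (by simp [hv])]
        · rw [if_pos hv]; exact List.mem_cons_of_mem _ hmem

theorem pvMem_pvRowsOf (grid : List (List Int)) : ∀ (s i : Int),
    i ∈ pvRowsOf grid s ↔
      ∃ k : Nat, k < grid.length ∧ i = s + (k : Int) ∧ (grid.getD k []).any (fun v => v != 0) = true := by
  induction grid with
  | nil => intro s i; simp [pvRowsOf_nil]
  | cons row rest ih =>
    intro s i
    rw [pvRowsOf_cons]
    constructor
    · intro hi
      by_cases ha : row.any (fun v => v != 0)
      · rw [if_pos ha] at hi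
        rcases List.mem_cons.mp hi with rfl | hi
        · exact ⟨0, by simp, by simp, by simpa using ha⟩
        · obtain ⟨k, hk, hik, hany⟩ := (ih (s + 1) i).mp hi
          exact ⟨k + 1, by simpa using hk, by push_cast; omega, by simpa using hany⟩
      · rw [if_neg ha] at hi
        obtain ⟨k, hk, hik, hany⟩ := (ih (s + 1) i).mp hi
        exact ⟨k + 1, by simpa using hk, by push_cast; omega, by simpa using hany⟩
    · rintro ⟨k, hk, rfl, hany⟩
      cases k with
      | zero =>
        simp only [List.getD_cons_zero] at hany
        rw [if_pos hany]; simp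
      | succ k' =>
        have hmem : s + 1 + (k' : Int) ∈ pvRowsOf rest (s + 1) :=
          (ih (s + 1) _).mpr ⟨k', by simpa using hk, rfl, by simpa using hany⟩
        have hx : s + ((k' + 1 : Nat) : Int) = s + 1 + (k' : Int) := by push_cast; omega
        rw [hx]
        by_cases ha : row.any (fun v => v != 0)
        · rw [if_pos ha]; exact List.mem_cons_of_mem _ hmem
        · rwa [if_neg ha]

theorem pvRowsOf_bounds (grid : List (List Int)) :
    ∀ (s : Int), ∀ i ∈ pvRowsOf grid s, s ≤ i ∧ i < s + grid.length := by
  intro s i hi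
  obtain ⟨k, hk, rfl, _⟩ := (pvMem_pvRowsOf grid s i).mp hi
  constructor
  · omega
  · have : (k : Int) < (grid.length : Int) := by exact_mod_cast hk
    omega

theorem pvRowsOf_sorted (grid : List (List Int)) :
    ∀ (s : Int), (pvRowsOf grid s).Pairwise (· ≤ ·) := by
  induction grid with
  | nil => intro s; simp [pvRowsOf_nil]
  | cons row rest ih =>
    intro s
    rw [pvRowsOf_cons]
    by_cases ha : row.any (fun v => v != 0)
    · simp only [ha, if_true]
      refine List.Pairwise.cons ?_ (ih (s + 1))
      intro x hx
      have := (pvRowsOf_bounds rest (s + 1) x hx).1; omega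
    · simp only [ha, Bool.false_eq_true, if_false]; exact ih (s + 1)

theorem pvRowsOf_ne_nil (grid : List (List Int)) :
    ∀ (s : Int) (row : List Int), row ∈ grid → row.any (fun v => v != 0) →
      pvRowsOf grid s ≠ [] := by
  induction grid with
  | nil => intro s row hrow _; simp at hrow
  | cons r rest ih =>
    intro s row hrow hany
    rw [pvRowsOf_cons]
    rcases List.mem_cons.mp hrow with rfl | hrow
    · simp [hany]
    · by_cases ha : r.any (fun v => v != 0)
      · simp [ha]
      · simpa [ha] using ih (s + 1) row hrow hany

theorem pvMem_pvColsOf_le (row : List Int) : ∀ (s : Int) (t : Nat) (v : Int),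
    v ∈ row.take t → v ≠ 0 → ∃ j ∈ pvColsOf row s, j ≤ s + t - 1 := by
  induction row with
  | nil => intro s t v hv _; simp at hv
  | cons w ws ih =>
    intro s t v hv hv0
    cases t with
    | zero => simp at hv
    | succ u =>
      rw [List.take_succ_cons, List.mem_cons] at hv
      rcases hv with rfl | hv
      · refine ⟨s, ?_, by push_cast; omega⟩
        rw [pvColsOf_cons, if_pos hv0]; exact List.mem_cons_self
      · obtain ⟨j, hj, hjle⟩ := ih (s + 1) u v hv hv0
        refine ⟨j, ?_, by push_cast at hjle ⊢; omega⟩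
        rw [pvColsOf_cons]
        by_cases hw : w = 0
        · simpa [hw] using hj
        · simp [hw, List.mem_cons]; right; exact hj

theorem pvFoldl_min_of_le (l : List Int) : ∀ (c : Int), (∀ x ∈ l, c ≤ x) → l.foldl min c = c := by
  induction l with
  | nil => intro c _; rfl
  | cons x t ih =>
    intro c h
    rw [List.foldl_cons, min_eq_left (h x List.mem_cons_self)]
    exact ih c (fun y hy => h y (List.mem_cons_of_mem _ hy))

theorem pvFoldl_last {α : Type} (l : List α) : ∀ (b : α),
    l.foldl (fun _ x => x) b = l.getLastD b := by
  induction l with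
  | nil => intro b; rfl
  | cons c t ih => intro b; rw [List.foldl_cons, List.getLastD_cons]; exact ih c

theorem pvFoldl_max_sorted (l : List Int) : ∀ (c : Int),
    (∀ x ∈ l, c ≤ x) → l.Pairwise (· ≤ ·) → l.foldl max c = l.getLastD c := by
  induction l with
  | nil => intro c _ _; rfl
  | cons x t ih =>
    intro c hle hp
    rw [List.foldl_cons, List.getLastD_cons,
        max_eq_right (hle x List.mem_cons_self)]
    exact ih x (fun y hy => List.rel_of_pairwise_cons hp hy) hp.of_cons

-- index? finds the first true of a mask: if position k is true and everything below is false
theorem pvIndex_first (mask : List Bool) (k : Nat) (hk : k < mask.length)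
    (ht : mask[k] = true) (hmin : ∀ j (_ : j < mask.length), mask[j] = true → k ≤ j) :
    PySem.List.index? mask true = some k := by
  have hmem : true ∈ mask := by
    exact ht ▸ List.getElem_mem hk
  obtain ⟨k', hk'⟩ := Option.isSome_iff_exists.mp ((PySem.List.index?_isSome_iff mask true).mpr hmem)
  obtain ⟨hk'len, hgk', hbelow⟩ := PySem.List.getElem_of_index?_eq_some hk'
  have h1 : k ≤ k' := hmin k' hk'len hgk'
  have h2 : ¬ (k < k') := fun hlt => hbelow k hlt ht
  have : k = k' := by omega
  rw [hk', this]

theorem pvIndex_last (mask : List Bool) (k : Nat) (hk : k < mask.length)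
    (ht : mask[k] = true) (hmax : ∀ j (_ : j < mask.length), mask[j] = true → j ≤ k) :
    PySem.List.index? mask.reverse true = some (mask.length - 1 - k) := by
  refine pvIndex_first mask.reverse (mask.length - 1 - k)
    (by rw [List.length_reverse]; omega) ?_ ?_
  · rw [List.getElem_reverse]
    have : mask.length - 1 - (mask.length - 1 - k) = k := by omega
    simp only [this]; exact ht
  · intro j hj htj
    rw [List.length_reverse] at hj
    rw [List.getElem_reverse] at htj
    have := hmax (mask.length - 1 - j) (by omega) htj
    omega

-- the column probe is true exactly when some row has a nonzero in column k
theorem pvColProbe_iff (grid : List (List Int)) (k : Nat) :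
    pvColProbe grid (k : Int) = true ↔ ∃ r ∈ grid, k < r.length ∧ r.getD k 0 ≠ 0 := by
  unfold pvColProbe
  rw [List.any_eq_true]
  constructor
  · rintro ⟨r, hr, hc⟩
    rw [Bool.and_eq_true, decide_eq_true_eq, bne_iff_ne] at hc
    obtain ⟨hlt, hnz⟩ := hc
    have hklt : k < r.length := by exact_mod_cast hlt
    refine ⟨r, hr, hklt, ?_⟩
    rw [PySem.List.pyGet?_natCast, List.getElem?_eq_getElem hklt, Option.getD_some] at hnz
    rwa [List.getD_eq_getElem r 0 hklt]
  · rintro ⟨r, hr, hklt, hnz⟩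
    refine ⟨r, hr, ?_⟩
    rw [Bool.and_eq_true, decide_eq_true_eq, bne_iff_ne]
    refine ⟨by exact_mod_cast hklt, ?_⟩
    rw [PySem.List.pyGet?_natCast, List.getElem?_eq_getElem hklt, Option.getD_some]
    rwa [List.getD_eq_getElem r 0 hklt] at hnz

-- ===== VERDICT (by name: the statement is the Claim_ definition above) =====
theorem minimumArea_spec : Claim_equal_minimumArea := by
  unfold Claim_equal_minimumArea
  intro grid _ hpre
  obtain ⟨hne, row, hrow, v, hv, hv0⟩ := hpre
  obtain ⟨g0, gr, rfl⟩ : ∃ g0 gr, grid = g0 :: gr := by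
    cases grid with
    | nil => exact absurd rfl hne
    | cons a l => exact ⟨a, l, rfl⟩
  unfold Spec_minimumArea minimumArea minimumArea_alt
  have hget : PySem.List.pyGet? (g0 :: gr) (0 : Int) = some g0 := by simp [pysem]
  rw [hget]
  simp only [Option.getD_some]
  rw [pvOuter_eq]
  rw [List.map_cons, PySem.List.max?_id_cons, Option.getD_some]
  set cols := (g0 :: gr).flatMap (fun r => pvColsOf r 0) with hcolsdef
  set rows := pvRowsOf (g0 :: gr) 0 with hrowsdef
  set W : Int := (gr.map (fun r => (r.length : Int))).foldl max (g0.length : Int) with hWdef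
  -- Pre_-derived facts
  have hhead : (g0 :: gr).headD [] = g0 := rfl
  rw [hhead] at hv
  obtain ⟨j0, hj0mem, hj0le⟩ := pvMem_pvColsOf_le row 0 (g0.length + 1) v hv hv0
  have hj0cols : j0 ∈ cols := List.mem_flatMap.mpr ⟨row, hrow, hj0mem⟩
  have hj0n : j0 ≤ (g0.length : Int) := by push_cast at hj0le; omega
  have hj0nonneg : 0 ≤ j0 := by
    obtain ⟨k, _, hkeq, _⟩ := (pvMem_pvColsOf row 0 j0).mp hj0mem
    omega
  have hany : row.any (fun v => v != 0) = true :=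
    List.any_eq_true.mpr ⟨v, List.mem_of_mem_take hv, bne_iff_ne.mpr hv0⟩
  have hrne : rows ≠ [] := by rw [hrowsdef]; exact pvRowsOf_ne_nil _ 0 row hrow hany
  -- membership in cols as a Nat-indexed column predicate
  have hcols_mem : ∀ (k : Nat), (k : Int) ∈ cols ↔ ∃ r ∈ (g0 :: gr), k < r.length ∧ r.getD k 0 ≠ 0 := by
    intro k
    rw [hcolsdef, List.mem_flatMap]
    constructor
    · rintro ⟨r, hr, hmem⟩
      obtain ⟨k', hk', hkeq, hnz⟩ := (pvMem_pvColsOf r 0 _).mp hmem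
      have hkk : k = k' := by omega
      exact ⟨r, hr, hkk ▸ hk', hkk ▸ hnz⟩
    · rintro ⟨r, hr, hk, hnz⟩
      exact ⟨r, hr, (pvMem_pvColsOf r 0 _).mpr ⟨k, hk, by omega, hnz⟩⟩
  have hcols_elt : ∀ x ∈ cols, ∃ k : Nat, x = (k : Int) ∧ ∃ r ∈ (g0 :: gr), k < r.length ∧ r.getD k 0 ≠ 0 := by
    intro x hx
    obtain ⟨r, hr, hmem⟩ := List.mem_flatMap.mp hx
    obtain ⟨k, hk, hkeq, hnz⟩ := (pvMem_pvColsOf r 0 _).mp hmem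
    exact ⟨k, by omega, r, hr, hk, hnz⟩
  -- A's four accumulator values
  have hminle := PySem.List.foldl_min_le cols (g0.length : Int)
  have hmaxge := PySem.List.le_foldl_max cols (-1 : Int)
  have hlwmem : cols.foldl min (g0.length : Int) ∈ cols := by
    rcases PySem.List.foldl_min_mem cols (g0.length : Int) with h | h
    · have h1 := hminle.2 j0 hj0cols
      have h2 : cols.foldl min (g0.length : Int) = j0 := by omega
      rw [h2]; exact hj0cols
    · exact h
  have hrwmem : cols.foldl max (-1 : Int) ∈ cols := by
    rcases PySem.List.foldl_max_mem cols (-1 : Int) with h | h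
    · exfalso; have := hmaxge.2 j0 hj0cols; omega
    · exact h
  -- rows facts
  obtain ⟨r0, rt, hr⟩ := List.exists_cons_of_ne_nil hrne
  have hsorted : rows.Pairwise (· ≤ ·) := by rw [hrowsdef]; exact pvRowsOf_sorted _ 0
  have hbounds : ∀ i ∈ rows, 0 ≤ i ∧ i < ((g0 :: gr).length : Int) := by
    intro i hi
    have := pvRowsOf_bounds (g0 :: gr) 0 i (hrowsdef ▸ hi)
    omega
  have hr0mem : r0 ∈ rows := by rw [hr]; exact List.mem_cons_self
  have hthA : rows.foldl min ((g0 :: gr).length : Int) = r0 := by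
    rw [hr, List.foldl_cons, min_eq_right (le_of_lt (hbounds r0 hr0mem).2)]
    refine pvFoldl_min_of_le rt r0 ?_
    intro y hy
    rw [hr] at hsorted
    exact List.rel_of_pairwise_cons hsorted hy
  have hmax0 : ∀ x ∈ rows, (0 : Int) ≤ x := fun x hx => (hbounds x hx).1
  have hbh : rows.foldl (fun _ x => x) (0 : Int) = rows.foldl max 0 := by
    rw [pvFoldl_last, pvFoldl_max_sorted rows 0 hmax0 hsorted]
  have hbhub := PySem.List.le_foldl_max rows (0 : Int)
  have hbhmem : rows.foldl max (0 : Int) ∈ rows := by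
    rcases PySem.List.foldl_max_mem rows (0 : Int) with h | h
    · have h1 := hbhub.2 r0 hr0mem
      have h2 := hmax0 r0 hr0mem
      have h3 : r0 = rows.foldl max (0 : Int) := by omega
      exact h3 ▸ hr0mem
    · exact h
  -- row mask: first and last true positions
  obtain ⟨kt, hktlen, hkteq, hktany⟩ := (pvMem_pvRowsOf _ 0 r0).mp (hrowsdef ▸ hr0mem)
  obtain ⟨kb, hkblen, hkbeq, hkbany⟩ := (pvMem_pvRowsOf _ 0 _).mp (hrowsdef ▸ hbhmem)
  rw [← hrowsdef] at hkbeq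
  have hrm_mem : ∀ (j : Nat) (hj : j < (g0 :: gr).length),
      ((g0 :: gr).map (fun r => r.any (fun v => v != 0)))[j]'(by simpa using hj) = true →
      (j : Int) ∈ rows := by
    intro j hj htj
    rw [List.getElem_map] at htj
    rw [hrowsdef]
    exact (pvMem_pvRowsOf _ 0 _).mpr ⟨j, hj, by omega, by rwa [List.getD_eq_getElem _ [] hj]⟩
  have htop : PySem.List.index? ((g0 :: gr).map (fun r => r.any (fun v => v != 0))) true = some kt := by
    refine pvIndex_first _ kt (by simpa using hktlen) ?_ ?_
    · rw [List.getElem_map]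
      rwa [List.getD_eq_getElem _ [] hktlen] at hktany
    · intro j hj htj
      have hj' : j < (g0 :: gr).length := by simpa using hj
      have hjr := hrm_mem j hj' htj
      have h1 := (PySem.List.foldl_min_le rows ((g0 :: gr).length : Int)).2 _ hjr
      rw [hthA] at h1
      omega
  have hbot : PySem.List.index? ((g0 :: gr).map (fun r => r.any (fun v => v != 0))).reverse true
      = some ((g0 :: gr).length - 1 - kb) := by
    have h := pvIndex_last ((g0 :: gr).map (fun r => r.any (fun v => v != 0))) kb
      (by simpa using hkblen)
      (by rw [List.getElem_map]; rwa [List.getD_eq_getElem _ [] hkblen] at hkbany)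
      (by
        intro j hj htj
        have hj' : j < (g0 :: gr).length := by simpa using hj
        have hjr := hrm_mem j hj' htj
        have h1 := hbhub.2 _ hjr
        omega)
    simpa using h
  -- column mask facts
  have hWge : ∀ r ∈ (g0 :: gr), (r.length : Int) ≤ W := by
    intro r hr'
    rcases List.mem_cons.mp hr' with rfl | h
    · exact (PySem.List.le_foldl_max _ _).1
    · exact (PySem.List.le_foldl_max _ _).2 _ (List.mem_map_of_mem h)
  have hW0 : (0 : Int) ≤ W := le_trans (by positivity) (hWge g0 List.mem_cons_self)
  have hcmlen : ((PySem.List.pyRange 0 W 1).map (fun j => pvColProbe (g0 :: gr) j)).length = W.toNat := by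
    simp [PySem.List.length_pyRange_one]
  have hcmget : ∀ (k : Nat) (hk : k < W.toNat),
      ((PySem.List.pyRange 0 W 1).map (fun j => pvColProbe (g0 :: gr) j))[k]'(by rw [hcmlen]; exact hk)
        = pvColProbe (g0 :: gr) (k : Int) := by
    intro k hk
    rw [List.getElem_map, PySem.List.getElem_pyRange_one, zero_add]
  -- left and right true positions of the column mask
  obtain ⟨kl, hkleq, rl, hrl, hkllt, hklnz⟩ := hcols_elt _ hlwmem
  obtain ⟨kr, hkreq, rr, hrr, hkrlt, hkrnz⟩ := hcols_elt _ hrwmem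
  have hklW : kl < W.toNat := by
    have := hWge rl hrl
    omega
  have hkrW : kr < W.toNat := by
    have := hWge rr hrr
    omega
  have hleft : PySem.List.index? ((PySem.List.pyRange 0 W 1).map (fun j => pvColProbe (g0 :: gr) j)) true = some kl := by
    refine pvIndex_first _ kl (by rw [hcmlen]; exact hklW) ?_ ?_
    · rw [hcmget kl hklW]
      exact (pvColProbe_iff _ kl).mpr ⟨rl, hrl, hkllt, hklnz⟩
    · intro j hj htj
      rw [hcmlen] at hj
      rw [hcmget j hj] at htj
      obtain ⟨r, hr', hlt, hnz⟩ := (pvColProbe_iff _ j).mp htj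
      have hjc : (j : Int) ∈ cols := (hcols_mem j).mpr ⟨r, hr', hlt, hnz⟩
      have := hminle.2 _ hjc
      omega
  have hright : PySem.List.index? ((PySem.List.pyRange 0 W 1).map (fun j => pvColProbe (g0 :: gr) j)).reverse true
      = some (W.toNat - 1 - kr) := by
    have h := pvIndex_last ((PySem.List.pyRange 0 W 1).map (fun j => pvColProbe (g0 :: gr) j)) kr
      (by rw [hcmlen]; exact hkrW)
      (by
        rw [hcmget kr hkrW]
        exact (pvColProbe_iff _ kr).mpr ⟨rr, hrr, hkrlt, hkrnz⟩)
      (by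
        intro j hj htj
        rw [hcmlen] at hj
        rw [hcmget j hj] at htj
        obtain ⟨r, hr', hlt, hnz⟩ := (pvColProbe_iff _ j).mp htj
        have hjc : (j : Int) ∈ cols := (hcols_mem j).mpr ⟨r, hr', hlt, hnz⟩
        have := hmaxge.2 _ hjc
        omega)
    rw [hcmlen] at h
    exact h
  -- assemble
  rw [hthA, hbh, htop, hbot, hleft, hright]
  simp only [Option.getD_some, List.length_map, hcmlen]
  rw [hkleq, hkreq, hkteq, hkbeq,
      show ((W.toNat - 1 - kr : Nat) : Int) = (W.toNat : Int) - 1 - (kr : Int) from by omega,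
      show (((g0 :: gr).length - 1 - kb : Nat) : Int) = ((g0 :: gr).length : Int) - 1 - (kb : Int) from by omega]
  ring
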